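-- pv_equiv track=rewrite | github.com/AvrilMZ/Teoria_de_Algoritmos | Actividades/2 - Greedy/ej14.py | submarinos
-- ===== SOURCE A (Python) =====
-- def comparten_area(submarino, faro):
-- 	x1, y1 = submarino
-- 	x2, y2 = faro
-- 	return (x2 - 2 <= x1 <= x2 + 2) and (y2 - 2 <= y1 <= y2 + 2)
--
-- def esta_iluminado(submarino, faros):
-- 	if len(faros) == 0:
-- 		return False
--
-- 	for faro in faros:
-- 		if comparten_area(submarino, faro):
-- 			return True
--
-- 	return False
--
-- def submarinos(matriz):
-- 	if len(matriz) == 0: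
-- 		return []
--
-- 	faros = []
-- 	while True:
-- 		max_cobertura = 0
-- 		mejor_pos = None
-- 		for i in range(0, len(matriz)):
-- 			for j in range(0, len(matriz[0])):
-- 				cobertura = 0
-- 				for x in range(0, len(matriz)):
-- 					for y in range(0, len(matriz[0])):
-- 						if (matriz[x][y] and not esta_iluminado((x, y), faros) and comparten_area((x, y), (i, j))):
-- 							cobertura += 1
-- 				if cobertura > max_cobertura:
-- 					max_cobertura = cobertura
-- 					mejor_pos = (i, j)
-- 		if max_cobertura == 0:
-- 			break
-- 		faros.append(mejor_pos)
--
-- 	return faros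
-- ===== SOURCE B (Python) =====
-- def en_ventana(fi, fj, x, y):
-- 	return fi - 2 <= x <= fi + 2 and fj - 2 <= y <= fj + 2
--
-- def submarinos(matriz):
-- 	n = len(matriz)
-- 	m = len(matriz[0]) if n else 0
-- 	pendientes = [(x, y) for x in range(n) for y in range(m) if matriz[x][y]]
-- 	faros = []
-- 	while pendientes:
-- 		cnt = {}
-- 		for (x, y) in pendientes:
-- 			for i in range(max(0, x - 2), min(n, x + 3)):
-- 				for j in range(max(0, y - 2), min(m, y + 3)):
-- 					cnt[(i, j)] = cnt.get((i, j), 0) + 1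
-- 		mejor = None
-- 		for pos, c in cnt.items():
-- 			if mejor is None or c > mejor[1] or (c == mejor[1] and pos < mejor[0]):
-- 				mejor = (pos, c)
-- 		fi, fj = mejor[0]
-- 		faros.append((fi, fj))
-- 		pendientes = [p for p in pendientes if not en_ventana(fi, fj, p[0], p[1])]
-- 	return faros
-- ===== Notes on version B (the rewrite author's own statement) =====
-- stated objective: faster
-- what changed: B replaces A's per-candidate full-grid rescan (with illumination re-derived from the lighthouse list every time) by a counter dictionary: each still-dark submarine adds 1 to every candidate in its clipped 5x5 window, the best candidate is read off the counter by max count with lexicographic tie-break, and covered submarines are filtered out of a shrinking worklist, so candidates are never enumerated over the whole grid.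
import Mathlib
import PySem

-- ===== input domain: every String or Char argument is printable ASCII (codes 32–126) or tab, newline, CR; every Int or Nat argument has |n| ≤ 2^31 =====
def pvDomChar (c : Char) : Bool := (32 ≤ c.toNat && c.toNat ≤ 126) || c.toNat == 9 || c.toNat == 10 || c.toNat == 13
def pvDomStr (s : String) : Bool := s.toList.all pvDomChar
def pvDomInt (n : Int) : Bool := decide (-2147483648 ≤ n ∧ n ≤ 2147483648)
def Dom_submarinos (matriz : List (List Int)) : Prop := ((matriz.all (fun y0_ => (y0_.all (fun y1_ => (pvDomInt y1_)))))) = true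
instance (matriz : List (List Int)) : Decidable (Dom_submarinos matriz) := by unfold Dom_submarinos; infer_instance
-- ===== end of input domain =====

-- B replaces A's per-candidate full-grid rescan (with illumination re-derived from the
-- lighthouse list each time) by a counter dictionary over clipped 5x5 windows of a
-- shrinking worklist of still-dark submarine cells, reading the best candidate off the
-- counter by max count with lexicographic tie-break.

-- ===== PORT A =====

def comparten_area (submarino faro : Int × Int) : Bool :=
  (decide (faro.1 - 2 ≤ submarino.1) && decide (submarino.1 ≤ faro.1 + 2)) &&
  (decide (faro.2 - 2 ≤ submarino.2) && decide (submarino.2 ≤ faro.2 + 2))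

def esta_iluminado (submarino : Int × Int) (faros : List (Int × Int)) : Bool :=
  if faros.length = 0 then false
  else faros.any (fun faro => comparten_area submarino faro)

-- matriz[x][y]; exact under Pre_ (every index drawn from range(len), rows wide enough)
def celda (matriz : List (List Int)) (x y : Int) : Int :=
  PySem.List.pyGetD (PySem.List.pyGetD matriz x []) y 0

-- the innermost double loop of A computing `cobertura` for candidate (i, j)
def cobertura_en (matriz : List (List Int)) (faros : List (Int × Int)) (i j : Int) : Int :=
  (PySem.List.pyRange 0 matriz.length 1).foldl (fun acc x =>
    (PySem.List.pyRange 0 (PySem.List.pyGetD matriz 0 []).length 1).foldl (fun acc y =>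
      if celda matriz x y ≠ 0 ∧ esta_iluminado (x, y) faros = false ∧
         comparten_area (x, y) (i, j) = true
      then acc + 1 else acc) acc) 0

-- A's double loop over candidates maintaining (max_cobertura, mejor_pos)
def escaneoA (matriz : List (List Int)) (faros : List (Int × Int)) : Int × Option (Int × Int) :=
  (PySem.List.pyRange 0 matriz.length 1).foldl (fun s i =>
    (PySem.List.pyRange 0 (PySem.List.pyGetD matriz 0 []).length 1).foldl (fun s j =>
      let c := cobertura_en matriz faros i j
      if s.1 < c then (c, some (i, j)) else s) s) (0, (none : Option (Int × Int)))

-- A's `while True` loop; fuel guard only: every appended lighthouse newly covers ≥ 1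
-- cell, so after at most rows*cols iterations max_cobertura = 0 and Python breaks.
def bucleA (matriz : List (List Int)) : Nat → List (Int × Int) → List (Int × Int)
  | 0, faros => faros
  | fuel + 1, faros =>
    let s := escaneoA matriz faros
    if s.1 = 0 then faros
    else match s.2 with
      | some p => bucleA matriz fuel (faros ++ [p])
      | none => faros  -- unreachable: mejor_pos is set whenever max_cobertura > 0

def submarinos (matriz : List (List Int)) : List (Int × Int) :=
  if matriz.length = 0 then []
  else bucleA matriz (matriz.length * (PySem.List.pyGetD matriz 0 []).length + 1) []

-- ===== PORT B =====

def en_ventana (fi fj x y : Int) : Bool :=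
  (decide (fi - 2 ≤ x) && decide (x ≤ fi + 2)) && (decide (fj - 2 ≤ y) && decide (y ≤ fj + 2))

-- the flat comprehension building the worklist of submarine cells, row-major
def pendB (matriz : List (List Int)) (n m : Int) : List (Int × Int) :=
  (PySem.List.pyRange 0 n 1).flatMap (fun x =>
    ((PySem.List.pyRange 0 m 1).filter
        (fun y => decide (PySem.List.pyGetD (PySem.List.pyGetD matriz x []) y 0 ≠ 0))).map
      (fun y => (x, y)))

-- B's counter: every pending cell adds 1 to each candidate of its clipped 5x5 window
def contadorB (n m : Int) (pend : List (Int × Int)) : PySem.Dict (Int × Int) Int :=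
  pend.foldl (fun d p =>
    (PySem.List.pyRange (max 0 (p.1 - 2)) (min n (p.1 + 3)) 1).foldl (fun d i =>
      (PySem.List.pyRange (max 0 (p.2 - 2)) (min m (p.2 + 3)) 1).foldl (fun d j =>
        d.insert (i, j) (d.getD (i, j) 0 + 1)) d) d) PySem.Dict.empty

-- Python tuple comparison pos < mejor[0] on int pairs
def lexLt (a b : Int × Int) : Bool :=
  decide (a.1 < b.1) || (a.1 == b.1 && decide (a.2 < b.2))

-- one step of B's argmax loop over the counter's items
def selStep (mejor : Option ((Int × Int) × Int)) (t : (Int × Int) × Int) :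
    Option ((Int × Int) × Int) :=
  match mejor with
  | none => some t
  | some b => if decide (b.2 < t.2) || (t.2 == b.2 && lexLt t.1 b.1) then some t else some b

def mejorB (cnt : PySem.Dict (Int × Int) Int) : Option ((Int × Int) × Int) :=
  cnt.items.foldl selStep none

-- B's `while pendientes` loop; fuel guard only: the chosen lighthouse covers ≥ 1
-- pending cell, so the worklist shrinks each iteration and empties within rows*cols steps.
def bucleB (n m : Int) : Nat → List (Int × Int) → List (Int × Int) → List (Int × Int)
  | 0, _, faros => faros
  | fuel + 1, pend, faros =>
    if pend.isEmpty then faros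
    else
      match mejorB (contadorB n m pend) with
      | some b =>
          bucleB n m fuel (pend.filter fun q => !(en_ventana b.1.1 b.1.2 q.1 q.2))
            (faros ++ [b.1])
      | none => faros  -- unreachable: a nonempty worklist always yields a candidate

def submarinos_alt (matriz : List (List Int)) : List (Int × Int) :=
  let n : Int := matriz.length
  let m : Int := if matriz.length = 0 then 0 else ((PySem.List.pyGetD matriz 0 []).length : Int)
  bucleB n m (matriz.length * m.toNat + 1) (pendB matriz n m) []

-- ===== PRECONDITION & SPEC =====

-- Pre_ excludes ragged matrices with a row shorter than row 0, on which the Python A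
-- raises IndexError (it indexes every row up to len(matriz[0])).
def Pre_submarinos (matriz : List (List Int)) : Prop :=
  ∀ fila ∈ matriz, (matriz.headD []).length ≤ fila.length

instance (matriz : List (List Int)) : Decidable (Pre_submarinos matriz) := by
  unfold Pre_submarinos; infer_instance

def pvWitness_submarinos : List (List Int) := [[1, 0, 0], [0, 0, 1]]

def Spec_submarinos (matriz : List (List Int)) (out : List (Int × Int)) : Prop :=
  out = submarinos_alt matriz
instance (matriz : List (List Int)) (out : List (Int × Int)) : Decidable (Spec_submarinos matriz out) := by
  unfold Spec_submarinos; infer_instance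

-- ===== CLAIM (what is proved, stated in full; the proofs are below) =====
def Claim_equal_submarinos : Prop := ∀ (matriz : List (List Int)), Dom_submarinos matriz → Pre_submarinos matriz → Spec_submarinos matriz (submarinos matriz)

-- ===== LEMMAS AND PROOFS =====

-- width expression used throughout: len(matriz[0])
def anchoDe (matriz : List (List Int)) : Int := ((PySem.List.pyGetD matriz 0 []).length : Int)

-- the cell predicate tracked by B's worklist: a submarine not yet illuminated
def condNF (matriz : List (List Int)) (faros : List (Int × Int)) (x y : Int) : Bool :=
  decide (celda matriz x y ≠ 0) && !esta_iluminado (x, y) faros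

-- row-major list of grid cells selected by a predicate
def NF (n m : Int) (p : Int → Int → Bool) : List (Int × Int) :=
  (PySem.List.pyRange 0 n 1).flatMap (fun x =>
    ((PySem.List.pyRange 0 m 1).filter (p x)).map (fun y => (x, y)))

-- count of worklist cells in the window of candidate (i, j)
def cB (pend : List (Int × Int)) (i j : Int) : Int :=
  ((pend.countP (fun p => en_ventana i j p.1 p.2)) : Int)

-- the flattened row-major candidate list of A's double scan
def Lcand (n m : Int) : List (Int × Int) :=
  (PySem.List.pyRange 0 n 1).flatMap (fun i =>
    (PySem.List.pyRange 0 m 1).map (fun j => (i, j)))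

-- A's scan as a single fold over the flattened candidate list
def scan1 (c : Int × Int → Int) (L : List (Int × Int)) : Int × Option (Int × Int) :=
  L.foldl (fun s q => if s.1 < c q then (c q, some q) else s) (0, none)

-- the clipped window of a pending cell, as the flat list B's counter loop walks
def ventana (n m : Int) (p : Int × Int) : List (Int × Int) :=
  (PySem.List.pyRange (max 0 (p.1 - 2)) (min n (p.1 + 3)) 1).flatMap (fun i =>
    (PySem.List.pyRange (max 0 (p.2 - 2)) (min m (p.2 + 3)) 1).map (fun j => (i, j)))

def Wlist (n m : Int) (pend : List (Int × Int)) : List (Int × Int) :=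
  pend.flatMap (ventana n m)

abbrev inGrid (n m : Int) (q : Int × Int) : Prop :=
  0 ≤ q.1 ∧ q.1 < n ∧ 0 ≤ q.2 ∧ q.2 < m

-- strict lexicographic order on positions (Python tuple <)
def Plex (a b : Int × Int) : Prop := a.1 < b.1 ∨ (a.1 = b.1 ∧ a.2 < b.2)

-- "t beats b" in B's argmax loop: bigger count, or equal count and lex-smaller position
def Better (t b : (Int × Int) × Int) : Prop := b.2 < t.2 ∨ (t.2 = b.2 ∧ Plex t.1 b.1)

theorem lexLt_iff (a b : Int × Int) : lexLt a b = true ↔ Plex a b := by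
  simp [lexLt, Plex]

theorem Plex_irrefl (a : Int × Int) : ¬ Plex a a := by simp [Plex]

theorem Plex_trans {a b c : Int × Int} (h1 : Plex a b) (h2 : Plex b c) : Plex a c := by
  rcases h1 with h1 | ⟨h1, h1'⟩ <;> rcases h2 with h2 | ⟨h2, h2'⟩ <;> unfold Plex <;> omega

theorem Plex_total {a b : Int × Int} (h : a ≠ b) : Plex a b ∨ Plex b a := by
  rcases a with ⟨a1, a2⟩; rcases b with ⟨b1, b2⟩
  simp only [ne_eq, Prod.mk.injEq, not_and] at h
  unfold Plex
  simp only []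
  by_cases h1 : a1 = b1
  · have := h h1; omega
  · omega

theorem Better_irrefl (b : (Int × Int) × Int) : ¬ Better b b := by
  simp [Better, Plex_irrefl]

theorem Better_trans {a b c : (Int × Int) × Int} (h1 : Better a b) (h2 : Better b c) :
    Better a c := by
  rcases h1 with h1 | ⟨h1, h1'⟩ <;> rcases h2 with h2 | ⟨h2, h2'⟩
  · exact Or.inl (lt_trans h2 h1)
  · exact Or.inl (by omega)
  · exact Or.inl (by omega)
  · exact Or.inr ⟨by omega, Plex_trans h1' h2'⟩

theorem Better_asymm {a b : (Int × Int) × Int} (h1 : Better a b) : ¬ Better b a :=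
  fun h2 => Better_irrefl a (Better_trans h1 h2)

theorem selStep_eq (b t : (Int × Int) × Int) :
    selStep (some b) t
      = if (decide (b.2 < t.2) || (t.2 == b.2 && lexLt t.1 b.1)) = true then some t
        else some b := rfl

theorem selStep_pos {b t : (Int × Int) × Int} (h : Better t b) :
    selStep (some b) t = some t := by
  rw [selStep_eq, if_pos ?_]
  rcases h with h | ⟨h, h'⟩
  · simp [h]
  · simp [lexLt_iff, h, h']

theorem selStep_neg {b t : (Int × Int) × Int} (h : ¬ Better t b) :
    selStep (some b) t = some b := by
  rw [selStep_eq, if_neg ?_]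
  simp only [Better, not_or, not_and] at h
  simp only [Bool.or_eq_true, Bool.and_eq_true, decide_eq_true_eq, beq_iff_eq, lexLt_iff,
    not_or, not_and]
  constructor
  · omega
  · intro he
    have := h.2 he
    intro hp
    exact this hp

theorem sum_map_ite_eq_countP {α : Type} (l : List α) (p : α → Bool) :
    (l.map (fun x => if p x = true then 1 else 0)).sum = l.countP p := by
  induction l with
  | nil => rfl
  | cons a t ih => cases h : p a <;> simp [h, ih, Nat.add_comm]

-- == A-side lemmas relating the scan to cB over the worklist ==

theorem ilum_any (s : Int × Int) (fs : List (Int × Int)) :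
    esta_iluminado s fs = fs.any (fun f => comparten_area s f) := by
  cases fs <;> simp [esta_iluminado]

theorem comparten_ventana (x y : Int) (p : Int × Int) :
    comparten_area (x, y) p = en_ventana p.1 p.2 x y := rfl

theorem en_ventana_self (x y : Int) : en_ventana x y x y = true := by
  simp only [en_ventana, Bool.and_eq_true, decide_eq_true_eq]
  omega

theorem ilum_append (s : Int × Int) (fs : List (Int × Int)) (p : Int × Int) :
    esta_iluminado s (fs ++ [p]) = (esta_iluminado s fs || comparten_area s p) := by
  simp [ilum_any]

theorem condNF_nil (matriz : List (List Int)) :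
    condNF matriz [] = fun x y => decide (celda matriz x y ≠ 0) := by
  funext x y
  simp [condNF, esta_iluminado]

theorem condNF_append (matriz : List (List Int)) (faros : List (Int × Int)) (p : Int × Int) :
    condNF matriz (faros ++ [p]) =
      fun x y => condNF matriz faros x y && !en_ventana p.1 p.2 x y := by
  funext x y
  simp [condNF, ilum_append, comparten_ventana, Bool.and_assoc]

theorem countP_flatMap' {α β : Type} (l : List α) (f : α → List β) (q : β → Bool) :
    (l.flatMap f).countP q = (l.map (fun x => (f x).countP q)).sum := by
  induction l with
  | nil => simp
  | cons a t ih => simp [List.countP_append, ih]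

theorem filter_flatMap' {α β : Type} (l : List α) (f : α → List β) (q : β → Bool) :
    (l.flatMap f).filter q = l.flatMap (fun x => (f x).filter q) := by
  induction l with
  | nil => simp
  | cons a t ih => simp [List.filter_append, ih]

theorem NF_filter (n m : Int) (p : Int → Int → Bool) (q : Int × Int → Bool) :
    (NF n m p).filter q = NF n m (fun x y => p x y && q (x, y)) := by
  unfold NF
  rw [filter_flatMap']
  congr 1
  funext x
  rw [List.filter_map, List.filter_filter]
  congr 1
  apply List.filter_congr
  intro y _
  simp [Function.comp, Bool.and_comm]

theorem mem_NF {n m : Int} {p : Int → Int → Bool} {q : Int × Int} :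
    q ∈ NF n m p ↔ inGrid n m q ∧ p q.1 q.2 = true := by
  unfold NF inGrid
  simp only [List.mem_flatMap, List.mem_map, List.mem_filter, PySem.List.mem_pyRange_one]
  constructor
  · rintro ⟨x, hx, y, ⟨hy, hp⟩, rfl⟩
    exact ⟨⟨hx.1, hx.2, hy.1, hy.2⟩, hp⟩
  · rintro ⟨⟨h1, h2, h3, h4⟩, hp⟩
    exact ⟨q.1, ⟨h1, h2⟩, q.2, ⟨⟨h3, h4⟩, hp⟩, rfl⟩

theorem pred_eq (matriz : List (List Int)) (faros : List (Int × Int)) (i j x y : Int) :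
    decide (celda matriz x y ≠ 0 ∧ esta_iluminado (x, y) faros = false ∧
        comparten_area (x, y) (i, j) = true)
      = (en_ventana i j x y && condNF matriz faros x y) := by
  by_cases h1 : celda matriz x y ≠ 0 <;>
    cases h2 : esta_iluminado (x, y) faros <;>
      cases h3 : en_ventana i j x y <;>
        simp [condNF, comparten_ventana, h1, h2, h3]

theorem cobertura_eq (matriz : List (List Int)) (faros : List (Int × Int)) (i j : Int) :
    cobertura_en matriz faros i j
      = cB (NF (matriz.length : Int) (anchoDe matriz) (condNF matriz faros)) i j := by
  unfold cB
  unfold cobertura_en NF anchoDe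
  simp only [PySem.List.foldl_ite_add_one, PySem.List.foldl_add, countP_flatMap',
    List.countP_map, List.countP_filter, Nat.cast_list_sum, List.map_map, zero_add]
  congr 1
  apply List.map_congr_left
  intro x _
  simp only [Function.comp]
  congr 1
  apply List.countP_congr
  intro y _
  rw [pred_eq]

-- row-major products of ascending ranges are lexicographically sorted
theorem grid_pairwise (a b c d : Int) :
    ((PySem.List.pyRange a b 1).flatMap (fun i =>
      (PySem.List.pyRange c d 1).map (fun j => (i, j)))).Pairwise Plex := by
  rw [List.pairwise_flatMap]
  constructor
  · intro i _
    rw [List.pairwise_map]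
    exact (PySem.List.pairwise_lt_pyRange_one c d).imp (fun h => Or.inr ⟨rfl, h⟩)
  · apply (PySem.List.pairwise_lt_pyRange_one a b).imp
    intro i1 i2 h x hx y hy
    simp only [List.mem_map] at hx hy
    obtain ⟨j1, _, rfl⟩ := hx
    obtain ⟨j2, _, rfl⟩ := hy
    exact Or.inl h

theorem Lcand_pairwise (n m : Int) : (Lcand n m).Pairwise Plex := grid_pairwise 0 n 0 m

theorem ventana_pairwise (n m : Int) (p : Int × Int) : (ventana n m p).Pairwise Plex :=
  grid_pairwise _ _ _ _

theorem nodup_of_pairwise_Plex {l : List (Int × Int)} (h : l.Pairwise Plex) : l.Nodup :=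
  h.imp (fun hp => by rintro rfl; exact Plex_irrefl _ hp)

theorem mem_Lcand {n m : Int} {q : Int × Int} : q ∈ Lcand n m ↔ inGrid n m q := by
  unfold Lcand inGrid
  simp only [List.mem_flatMap, List.mem_map, PySem.List.mem_pyRange_one]
  constructor
  · rintro ⟨i, hi, j, hj, rfl⟩
    exact ⟨hi.1, hi.2, hj.1, hj.2⟩
  · rintro ⟨h1, h2, h3, h4⟩
    exact ⟨q.1, ⟨h1, h2⟩, q.2, ⟨h3, h4⟩, rfl⟩

-- flattening A's double fold
theorem escaneoA_flat (matriz : List (List Int)) (faros : List (Int × Int)) :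
    escaneoA matriz faros
      = scan1 (fun q => cB (NF (matriz.length : Int) (anchoDe matriz) (condNF matriz faros)) q.1 q.2)
          (Lcand (matriz.length : Int) (anchoDe matriz)) := by
  unfold escaneoA scan1 Lcand anchoDe
  rw [List.foldl_flatMap]
  congr 1
  funext s i
  rw [List.foldl_map]
  congr 1
  funext s' j
  simp only [cobertura_eq, anchoDe]

-- characterization of A's scan: on a lex-sorted candidate list the first strict
-- maximum is the count-maximal, lex-smallest candidate (or none when all counts ≤ 0)
theorem scan1_char (c : Int × Int → Int) (L : List (Int × Int)) (hL : L.Pairwise Plex) :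
    (scan1 c L = (0, none) ∧ ∀ q ∈ L, c q ≤ 0) ∨
    (∃ p, scan1 c L = (c p, some p) ∧ p ∈ L ∧ 0 < c p ∧
      ∀ q ∈ L, c q < c p ∨ (c q = c p ∧ (q = p ∨ Plex p q))) := by
  induction L using List.reverseRecOn with
  | nil => exact Or.inl ⟨rfl, by simp⟩
  | append_singleton Q q ih =>
    have hQ : Q.Pairwise Plex := (List.pairwise_append.mp hL).1
    have hcross : ∀ x ∈ Q, Plex x q := by
      intro x hx
      exact (List.pairwise_append.mp hL).2.2 x hx q (by simp)
    have hsnoc : scan1 c (Q ++ [q])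
        = (if (scan1 c Q).1 < c q then (c q, some q) else scan1 c Q) := by
      unfold scan1
      rw [List.foldl_append]
      rfl
    rcases ih hQ with ⟨h0, hall⟩ | ⟨p, hs, hmem, hpos, hmax⟩
    · by_cases hq : 0 < c q
      · refine Or.inr ⟨q, ?_, by simp, hq, ?_⟩
        · rw [hsnoc, h0]; simp [hq]
        · intro r hr
          rcases List.mem_append.mp hr with hr | hr
          · exact Or.inl (lt_of_le_of_lt (hall r hr) hq)
          · simp at hr; subst hr; exact Or.inr ⟨rfl, Or.inl rfl⟩
      · refine Or.inl ⟨?_, ?_⟩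
        · rw [hsnoc, h0]; simp; omega
        · intro r hr
          rcases List.mem_append.mp hr with hr | hr
          · exact hall r hr
          · simp at hr; subst hr; omega
    · by_cases hq : c p < c q
      · refine Or.inr ⟨q, ?_, by simp, lt_trans hpos hq, ?_⟩
        · rw [hsnoc, hs]; simp [hq]
        · intro r hr
          rcases List.mem_append.mp hr with hr | hr
          · rcases hmax r hr with h | ⟨h, _⟩
            · exact Or.inl (lt_trans h hq)
            · exact Or.inl (h ▸ hq)
          · simp at hr; subst hr; exact Or.inr ⟨rfl, Or.inl rfl⟩
      · refine Or.inr ⟨p, ?_, List.mem_append.mpr (Or.inl hmem), hpos, ?_⟩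
        · rw [hsnoc, hs]; simp; omega
        · intro r hr
          rcases List.mem_append.mp hr with hr | hr
          · exact hmax r hr
          · simp at hr; subst hr
            rcases lt_or_eq_of_le (not_lt.mp hq) with h | h
            · exact Or.inl h
            · exact Or.inr ⟨h, Or.inr (hcross p hmem)⟩

-- == B-side lemmas: the counter and its items ==

theorem contadorB_eq_counter (n m : Int) (pend : List (Int × Int)) :
    contadorB n m pend = PySem.Dict.counter (Wlist n m pend) := by
  rw [← PySem.Dict.foldl_insert_getD_add_one_eq_counter]
  unfold contadorB Wlist
  rw [List.foldl_flatMap]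
  congr 1
  funext d p
  unfold ventana
  rw [List.foldl_flatMap]
  congr 1
  funext d' i
  rw [List.foldl_map]

theorem mem_ventana {n m : Int} {p q : Int × Int} :
    q ∈ ventana n m p ↔ inGrid n m q ∧ en_ventana q.1 q.2 p.1 p.2 = true := by
  unfold ventana inGrid en_ventana
  simp only [List.mem_flatMap, List.mem_map, PySem.List.mem_pyRange_one,
    Bool.and_eq_true, decide_eq_true_eq]
  constructor
  · rintro ⟨i, hi, j, hj, rfl⟩
    dsimp only
    and_intros <;> omega
  · intro h
    exact ⟨q.1, by omega, q.2, by omega, rfl⟩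

theorem count_Wlist (n m : Int) (pend : List (Int × Int)) (q : Int × Int) :
    (Wlist n m pend).count q
      = if inGrid n m q then pend.countP (fun p => en_ventana q.1 q.2 p.1 p.2) else 0 := by
  unfold Wlist
  rw [List.count_flatMap]
  have h1 : ∀ p, List.count q (ventana n m p)
      = if inGrid n m q ∧ en_ventana q.1 q.2 p.1 p.2 = true then 1 else 0 := by
    intro p
    rw [List.Nodup.count (nodup_of_pairwise_Plex (ventana_pairwise n m p))]
    simp [mem_ventana]
  by_cases hg : inGrid n m q
  · rw [if_pos hg]
    calc (pend.map (List.count q ∘ ventana n m)).sum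
        = (pend.map (fun p => if en_ventana q.1 q.2 p.1 p.2 = true then 1 else 0)).sum := by
          apply congrArg List.sum
          apply List.map_congr_left
          intro p _
          rw [Function.comp_apply, h1 p]
          by_cases he : en_ventana q.1 q.2 p.1 p.2 = true
          · simp [he, hg]
          · simp [he]
      _ = pend.countP (fun p => en_ventana q.1 q.2 p.1 p.2) :=
          sum_map_ite_eq_countP pend _
  · rw [if_neg hg]
    have : ∀ p ∈ pend, (List.count q ∘ ventana n m) p = 0 := by
      intro p _
      rw [Function.comp_apply, h1 p]
      simp [hg]
    rw [List.map_congr_left this]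
    simp

theorem mem_items_iff (n m : Int) (pend : List (Int × Int)) (t : (Int × Int) × Int) :
    t ∈ (contadorB n m pend).items
      ↔ inGrid n m t.1 ∧ 0 < t.2 ∧ t.2 = cB pend t.1.1 t.1.2 := by
  rw [contadorB_eq_counter, PySem.Dict.items_counter]
  simp only [List.mem_map, PySem.Set.mem_ofList]
  constructor
  · rintro ⟨k, hk, rfl⟩
    simp only [Wlist, List.mem_flatMap] at hk
    obtain ⟨p, hp, hkv⟩ := hk
    have hg := (mem_ventana.mp hkv).1
    have hw := (mem_ventana.mp hkv).2
    have hcount := count_Wlist n m pend k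
    rw [if_pos hg] at hcount
    refine ⟨hg, ?_, ?_⟩
    · simp only [hcount]
      have : 0 < pend.countP (fun p => en_ventana k.1 k.2 p.1 p.2) :=
        List.countP_pos_iff.mpr ⟨p, hp, hw⟩
      exact_mod_cast this
    · simp [hcount, cB]
  · rintro ⟨hg, hpos, hval⟩
    refine ⟨t.1, ?_, ?_⟩
    · have : 0 < pend.countP (fun p => en_ventana t.1.1 t.1.2 p.1 p.2) := by
        rw [cB] at hval; omega
      obtain ⟨p, hp, hw⟩ := List.countP_pos_iff.mp this
      show t.1 ∈ pend.flatMap (ventana n m)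
      exact List.mem_flatMap.mpr ⟨p, hp, mem_ventana.mpr ⟨hg, hw⟩⟩
    · have hcount := count_Wlist n m pend t.1
      rw [if_pos hg] at hcount
      rw [cB] at hval
      cases t with
      | mk k v =>
        simp only at hcount hval ⊢
        rw [hcount, ← hval]

-- == the argmax fold: membership, improvement, maximality ==

theorem sel_isSome (L : List ((Int × Int) × Int)) (b : (Int × Int) × Int) :
    ∃ b', L.foldl selStep (some b) = some b' := by
  induction L generalizing b with
  | nil => exact ⟨b, rfl⟩
  | cons t L ih =>
    rw [List.foldl_cons]
    by_cases h : Better t b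
    · rw [selStep_pos h]; exact ih t
    · rw [selStep_neg h]; exact ih b

theorem sel_improve (L : List ((Int × Int) × Int)) (b b' : (Int × Int) × Int)
    (h : L.foldl selStep (some b) = some b') : b' = b ∨ Better b' b := by
  induction L generalizing b with
  | nil =>
    injection h with h'
    exact Or.inl h'.symm
  | cons t L ih =>
    rw [List.foldl_cons] at h
    by_cases hb : Better t b
    · rw [selStep_pos hb] at h
      rcases ih t h with rfl | h'
      · exact Or.inr hb
      · exact Or.inr (Better_trans h' hb)
    · rw [selStep_neg hb] at h
      exact ih b h

theorem sel_mem (L : List ((Int × Int) × Int)) (b0 : Option ((Int × Int) × Int))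
    (b' : (Int × Int) × Int) (h : L.foldl selStep b0 = some b') :
    b' ∈ L ∨ b0 = some b' := by
  induction L generalizing b0 with
  | nil => exact Or.inr h
  | cons t L ih =>
    rw [List.foldl_cons] at h
    rcases ih _ h with h' | h'
    · exact Or.inl (List.mem_cons_of_mem _ h')
    · cases b0 with
      | none =>
        simp only [selStep] at h'
        injection h' with h''
        exact Or.inl (h'' ▸ List.mem_cons_self)
      | some b =>
        by_cases hb : Better t b
        · rw [selStep_pos hb] at h'
          injection h' with h''
          exact Or.inl (h'' ▸ List.mem_cons_self)
        · rw [selStep_neg hb] at h'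
          injection h' with h''
          exact Or.inr (congrArg some h'')

theorem sel_max (L : List ((Int × Int) × Int)) (b0 : Option ((Int × Int) × Int))
    (b' : (Int × Int) × Int) (h : L.foldl selStep b0 = some b') :
    ∀ t ∈ L, ¬ Better t b' := by
  induction L generalizing b0 with
  | nil => intro t ht; cases ht
  | cons u L ih =>
    intro t ht
    rw [List.foldl_cons] at h
    rcases List.mem_cons.mp ht with rfl | ht'
    · -- t = u : the state after processing u is some c with c = u ∨ ¬ Better u c
      have hstate : ∃ c, selStep b0 t = some c ∧ (c = t ∨ ¬ Better t c) := by
        cases b0 with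
        | none => exact ⟨t, rfl, Or.inl rfl⟩
        | some b =>
          by_cases hb : Better t b
          · rw [selStep_pos hb]; exact ⟨t, rfl, Or.inl rfl⟩
          · rw [selStep_neg hb]; exact ⟨b, rfl, Or.inr hb⟩
      obtain ⟨c, hc, hcase⟩ := hstate
      rw [hc] at h
      rcases sel_improve L c b' h with rfl | himp
      · rcases hcase with rfl | hnb
        · exact Better_irrefl b'
        · exact hnb
      · rcases hcase with rfl | hnb
        · exact Better_asymm himp
        · intro htb
          exact hnb (Better_trans htb himp)
    · exact ih _ h t ht'

-- uniqueness of the maximum over the item set (values are a function of the key)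
theorem max_unique {S : List ((Int × Int) × Int)} {cb : Int × Int → Int}
    (hS : ∀ t ∈ S, t.2 = cb t.1) {b1 b2 : (Int × Int) × Int}
    (h1 : b1 ∈ S) (h2 : b2 ∈ S)
    (m1 : ∀ t ∈ S, ¬ Better t b1) (m2 : ∀ t ∈ S, ¬ Better t b2) : b1 = b2 := by
  by_cases hk : b1.1 = b2.1
  · have hv : b1.2 = b2.2 := by rw [hS b1 h1, hS b2 h2, hk]
    exact Prod.ext hk hv
  · rcases Plex_total hk with hp | hp
    · rcases lt_trichotomy b1.2 b2.2 with h | h | h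
      · exact absurd (Or.inl h : Better b2 b1) (m1 b2 h2)
      · exact absurd (Or.inr ⟨h, hp⟩ : Better b1 b2) (m2 b1 h1)
      · exact absurd (Or.inl h : Better b1 b2) (m2 b1 h1)
    · rcases lt_trichotomy b2.2 b1.2 with h | h | h
      · exact absurd (Or.inl h : Better b1 b2) (m2 b1 h1)
      · exact absurd (Or.inr ⟨h, hp⟩ : Better b2 b1) (m1 b2 h2)
      · exact absurd (Or.inl h : Better b2 b1) (m1 b2 h2)

-- == the per-iteration selection agreement ==

theorem scan1_empty_pend (c : Int × Int → Int) (L : List (Int × Int))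
    (hL : L.Pairwise Plex) (hc : ∀ q, c q = 0) : scan1 c L = (0, none) := by
  rcases scan1_char c L hL with ⟨h, _⟩ | ⟨p, _, _, hpos, _⟩
  · exact h
  · rw [hc p] at hpos; omega

-- pend nonempty (and inside the grid): A's scan and B's argmax pick the same candidate
theorem select_agree (n m : Int) (pend : List (Int × Int))
    (hsub : ∀ q ∈ pend, inGrid n m q) (hne : pend ≠ []) :
    ∃ p cp, scan1 (fun q => cB pend q.1 q.2) (Lcand n m) = (cp, some p) ∧ 0 < cp ∧
      mejorB (contadorB n m pend) = some (p, cp) := by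
  obtain ⟨q0, hq0⟩ := List.exists_mem_of_ne_nil pend hne
  have hq0g : inGrid n m q0 := hsub q0 hq0
  have hq0c : 0 < cB pend q0.1 q0.2 := by
    unfold cB
    have : 0 < pend.countP (fun p => en_ventana q0.1 q0.2 p.1 p.2) :=
      List.countP_pos_iff.mpr ⟨q0, hq0, en_ventana_self q0.1 q0.2⟩
    exact_mod_cast this
  rcases scan1_char (fun q => cB pend q.1 q.2) (Lcand n m) (Lcand_pairwise n m) with
    ⟨_, hall⟩ | ⟨p, hs, hmem, hpos, hmax⟩
  · exact absurd (hall q0 (mem_Lcand.mpr hq0g)) (by omega)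
  · -- B's fold returns some b
    have hitems : ((p, cB pend p.1 p.2) : (Int × Int) × Int) ∈ (contadorB n m pend).items :=
      (mem_items_iff n m pend (p, cB pend p.1 p.2)).mpr ⟨mem_Lcand.mp hmem, hpos, rfl⟩
    have hkey : ∀ t ∈ (contadorB n m pend).items, t.2 = cB pend t.1.1 t.1.2 := by
      intro t ht; exact ((mem_items_iff n m pend t).mp ht).2.2
    obtain ⟨L1, L2, hsplit⟩ := List.append_of_mem hitems
    have hbsome : ∃ b, mejorB (contadorB n m pend) = some b := by
      unfold mejorB
      rw [hsplit, List.foldl_append, List.foldl_cons]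
      cases hL1 : L1.foldl selStep none with
      | none =>
        simp only [selStep]
        exact sel_isSome L2 _
      | some b =>
        by_cases h : Better (p, cB pend p.1 p.2) b
        · rw [selStep_pos h]; exact sel_isSome L2 _
        · rw [selStep_neg h]; exact sel_isSome L2 b
    obtain ⟨b, hb⟩ := hbsome
    have hbmem : b ∈ (contadorB n m pend).items := by
      rcases sel_mem _ _ _ hb with h | h
      · exact h
      · cases h
    have hbmax : ∀ t ∈ (contadorB n m pend).items, ¬ Better t b := sel_max _ _ _ hb
    -- (p, cp) is also maximal over the items
    have hpmax : ∀ t ∈ (contadorB n m pend).items, ¬ Better t (p, cB pend p.1 p.2) := by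
      intro t ht hbet
      obtain ⟨htg, htpos, htval⟩ := (mem_items_iff n m pend t).mp ht
      have hq := hmax t.1 (mem_Lcand.mpr htg)
      rcases hbet with hbet | ⟨hveq, hlex⟩
      · have hbet' : cB pend p.1 p.2 < t.2 := hbet
        rcases hq with h | ⟨h, _⟩ <;> omega
      · have hveq' : t.2 = cB pend p.1 p.2 := hveq
        rcases hq with h | ⟨h, h'⟩
        · omega
        · rcases h' with rfl | h'
          · exact Plex_irrefl _ hlex
          · exact Plex_irrefl _ (Plex_trans h' hlex)
    have := max_unique (cb := fun k => cB pend k.1 k.2) hkey hbmem hitems hbmax hpmax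
    exact ⟨p, cB pend p.1 p.2, hs, hpos, by rw [hb, this]⟩

-- == the loop equivalence ==

theorem bucle_eq (matriz : List (List Int)) :
    ∀ (fuel : Nat) (faros : List (Int × Int)),
      bucleA matriz fuel faros
        = bucleB (matriz.length : Int) (anchoDe matriz) fuel
            (NF (matriz.length : Int) (anchoDe matriz) (condNF matriz faros)) faros := by
  intro fuel
  induction fuel with
  | zero => intro faros; rfl
  | succ k ih =>
    intro faros
    set n : Int := (matriz.length : Int)
    set m : Int := anchoDe matriz
    set pend := NF n m (condNF matriz faros) with hpend
    by_cases hp : pend = []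
    · have hA : escaneoA matriz faros = (0, none) := by
        rw [escaneoA_flat]
        apply scan1_empty_pend _ _ (Lcand_pairwise n m)
        intro q
        rw [← hpend, hp]
        rfl
      show (let s := escaneoA matriz faros;
            if s.1 = 0 then faros
            else match s.2 with
              | some p => bucleA matriz k (faros ++ [p])
              | none => faros) = _
      rw [hA]
      rw [hp]
      rfl
    · obtain ⟨p, cp, hscan, hpos, hbest⟩ :=
        select_agree n m pend (fun q hq => (mem_NF.mp (hpend ▸ hq)).1) hp
      have hA : escaneoA matriz faros = (cp, some p) := by
        rw [escaneoA_flat]; exact hscan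
      show (let s := escaneoA matriz faros;
            if s.1 = 0 then faros
            else match s.2 with
              | some q => bucleA matriz k (faros ++ [q])
              | none => faros) = _
      rw [hA]
      rw [if_neg (by omega)]
      have hBs : bucleB n m (k + 1) pend faros
          = (if pend.isEmpty then faros
             else match mejorB (contadorB n m pend) with
               | some b =>
                   bucleB n m k (pend.filter fun q => !(en_ventana b.1.1 b.1.2 q.1 q.2))
                     (faros ++ [b.1])
               | none => faros) := rfl
      rw [hBs, if_neg (by simp [hp]), hbest]
      show bucleA matriz k (faros ++ [p])
          = bucleB n m k (pend.filter fun q => !(en_ventana p.1 p.2 q.1 q.2)) (faros ++ [p])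
      have hfilter : pend.filter (fun q => !(en_ventana p.1 p.2 q.1 q.2))
          = NF n m (condNF matriz (faros ++ [p])) := by
        rw [hpend, NF_filter, condNF_append]
      rw [hfilter]
      exact ih (faros ++ [p])

-- ===== VERDICT (by name: the statement is the Claim_ definition above) =====
theorem submarinos_spec : Claim_equal_submarinos := by
  intro matriz _ _
  unfold Spec_submarinos submarinos submarinos_alt
  by_cases h : matriz.length = 0
  · rw [if_pos h]
    have hnil : matriz = [] := List.length_eq_zero_iff.mp h
    subst hnil
    rfl
  · rw [if_neg h]
    simp only [if_neg h]
    have hpend : pendB matriz (matriz.length : Int) (anchoDe matriz)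
        = NF (matriz.length : Int) (anchoDe matriz) (condNF matriz []) := by
      rw [condNF_nil]
      rfl
    have hancho : ((PySem.List.pyGetD matriz 0 []).length : Int).toNat
        = (PySem.List.pyGetD matriz 0 []).length := Int.toNat_natCast _
    rw [hancho]
    show bucleA matriz _ [] = bucleB _ (anchoDe matriz) _ (pendB matriz _ (anchoDe matriz)) []
    rw [hpend]
    exact bucle_eq matriz _ []
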